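-- pv_equiv track=rewrite | github.com/murraycutforth/Scottish-Winter-Coding | src/web_app/mwis_database.py | get_latest_info_per_day
-- ===== SOURCE A (Python) =====
-- def get_latest_info_per_day(all_forecasts):
--     forecasts = {}
--     for info_tuple in all_forecasts:
--         date = info_tuple[0]
--         days_ahead = info_tuple[1]
--         info = info_tuple[2]
--
--         if not date in forecasts:
--             forecasts[date] = (days_ahead, info)
--         else:
--             if days_ahead < forecasts[date][0]:
--                 forecasts[date] = (days_ahead, info)
--
--     return sorted((k, v[1]) for k, v in forecasts.items())
-- ===== SOURCE B (Python) =====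
-- def get_latest_info_per_day(all_forecasts):
--     dates = sorted(set(t[0] for t in all_forecasts))
--     result = []
--     for d in dates:
--         best = None
--         for date, days_ahead, info in all_forecasts:
--             if date == d:
--                 if best is None or days_ahead < best[0]:
--                     best = (days_ahead, info)
--         result.append((d, best[1]))
--     return result
-- ===== Notes on version B (the rewrite author's own statement) =====
-- stated objective: alternative
-- what changed: Replaced the dict-accumulation-then-sort with a dict-free decomposition: sort the distinct dates once, then for each date pick its minimum-days_ahead entry (first among ties) by a direct scan of the input.
import Mathlib
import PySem

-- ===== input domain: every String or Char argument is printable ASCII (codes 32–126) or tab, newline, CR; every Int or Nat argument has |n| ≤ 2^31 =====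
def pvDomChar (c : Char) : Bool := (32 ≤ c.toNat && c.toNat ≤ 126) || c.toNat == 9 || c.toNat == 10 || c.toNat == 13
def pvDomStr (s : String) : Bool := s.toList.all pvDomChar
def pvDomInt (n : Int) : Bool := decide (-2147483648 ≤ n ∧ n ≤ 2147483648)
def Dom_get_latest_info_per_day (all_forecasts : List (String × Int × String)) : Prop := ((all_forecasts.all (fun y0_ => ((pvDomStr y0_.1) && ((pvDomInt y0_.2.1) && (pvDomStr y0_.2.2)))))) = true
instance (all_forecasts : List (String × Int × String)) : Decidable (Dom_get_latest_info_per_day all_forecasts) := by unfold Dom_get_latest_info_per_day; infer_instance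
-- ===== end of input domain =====

-- B replaces A's dict-accumulation-then-sort with a dict-free decomposition (sorted distinct
-- dates, then a direct min-days scan per date); objective: alternative (not faster).

-- ===== PORT A =====
def get_latest_info_per_day (all_forecasts : List (String × Int × String)) : List (String × String) :=
  let forecasts : PySem.Dict String (Int × String) :=
    all_forecasts.foldl (fun d info_tuple =>
      let date := info_tuple.1
      let days_ahead := info_tuple.2.1
      let info := info_tuple.2.2
      if ¬ d.contains date then d.insert date (days_ahead, info)
      else if days_ahead < (d.getD date (0, "")).1 then d.insert date (days_ahead, info)
      else d) PySem.Dict.empty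
  -- sorted(...) on (str, str) tuples: Python's lexicographic tuple order = sorted2 on the components
  PySem.List.sorted2 (forecasts.items.map (fun kv => (kv.1, kv.2.2))) (fun p => p.1) (fun p => p.2)

-- ===== PORT B =====
-- the inner 'for … if date == d' best-scan of Source B
def pyBest (all_forecasts : List (String × Int × String)) (d : String) : Option (Int × String) :=
  all_forecasts.foldl (fun best t =>
    if t.1 = d then
      match best with
      | none => some (t.2.1, t.2.2)
      | some b => if t.2.1 < b.1 then some (t.2.1, t.2.2) else some b
    else best) none

def get_latest_info_per_day_alt (all_forecasts : List (String × Int × String)) : List (String × String) :=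
  let dates := PySem.List.sorted (PySem.Set.ofList (all_forecasts.map (fun t => t.1))) (fun x => x)
  -- best is never None here (d is drawn from the dates present), so best[1] is guarded: getD
  dates.foldl (fun result d => result ++ [(d, ((pyBest all_forecasts d).getD (0, "")).2)]) []

-- ===== PRECONDITION & SPEC =====
def Spec_get_latest_info_per_day (all_forecasts : List (String × Int × String)) (out : List (String × String)) : Prop := out = get_latest_info_per_day_alt all_forecasts
instance (all_forecasts : List (String × Int × String)) (out : List (String × String)) : Decidable (Spec_get_latest_info_per_day all_forecasts out) := by unfold Spec_get_latest_info_per_day; infer_instance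

-- ===== CLAIM (what is proved, stated in full; the proofs are below) =====
def Claim_equal_get_latest_info_per_day : Prop := ∀ (all_forecasts : List (String × Int × String)), Dom_get_latest_info_per_day all_forecasts → Spec_get_latest_info_per_day all_forecasts (get_latest_info_per_day all_forecasts)

-- ===== LEMMAS AND PROOFS =====

-- A's loop step and accumulated dict, named for the proofs
def stepA (d : PySem.Dict String (Int × String)) (t : String × Int × String) : PySem.Dict String (Int × String) :=
  if ¬ d.contains t.1 then d.insert t.1 (t.2.1, t.2.2)
  else if t.2.1 < (d.getD t.1 (0, "")).1 then d.insert t.1 (t.2.1, t.2.2)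
  else d

def dictA (all_forecasts : List (String × Int × String)) : PySem.Dict String (Int × String) :=
  all_forecasts.foldl stepA PySem.Dict.empty

theorem pyBest_snoc (xs : List (String × Int × String)) (x : String × Int × String) (d : String) :
    pyBest (xs ++ [x]) d =
      if x.1 = d then
        match pyBest xs d with
        | none => some (x.2.1, x.2.2)
        | some b => if x.2.1 < b.1 then some (x.2.1, x.2.2) else some b
      else pyBest xs d := by
  simp [pyBest, List.foldl_append]

theorem pyBest_aux_none_iff (d : String) (xs : List (String × Int × String)) :
    ∀ acc : Option (Int × String),
      (xs.foldl (fun best t =>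
        if t.1 = d then
          match best with
          | none => some (t.2.1, t.2.2)
          | some b => if t.2.1 < b.1 then some (t.2.1, t.2.2) else some b
        else best) acc = none) ↔ (acc = none ∧ ∀ t ∈ xs, t.1 ≠ d) := by
  induction xs with
  | nil => intro acc; simp
  | cons y ys ih =>
    intro acc
    simp only [List.foldl_cons, ih, List.mem_cons]
    constructor
    · rintro ⟨h1, h2⟩
      by_cases hy : y.1 = d
      · exfalso
        cases acc with
        | none => simp [hy] at h1
        | some b => simp [hy] at h1; split at h1 <;> simp at h1
      · simp [hy] at h1
        exact ⟨h1, fun t ht => ht.elim (fun e => e ▸ hy) (h2 t)⟩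
    · rintro ⟨h1, h2⟩
      have hy : y.1 ≠ d := h2 y (Or.inl rfl)
      exact ⟨by simp [hy, h1], fun t ht => h2 t (Or.inr ht)⟩

theorem pyBest_none_iff (xs : List (String × Int × String)) (d : String) :
    pyBest xs d = none ↔ d ∉ xs.map (fun t => t.1) := by
  unfold pyBest
  rw [pyBest_aux_none_iff]
  constructor
  · rintro ⟨-, h⟩ hmem
    obtain ⟨t, ht, rfl⟩ := List.mem_map.mp hmem
    exact h t ht rfl
  · intro h
    refine ⟨rfl, fun t ht e => h ?_⟩
    exact e ▸ List.mem_map_of_mem ht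

-- the characterisation of A's dict: its items are the distinct dates (first-occurrence order)
-- paired with exactly the value B's best-scan selects
theorem itemsA (all : List (String × Int × String)) :
    (dictA all).items =
      (PySem.Set.ofList (all.map (fun t => t.1))).map
        (fun d => (d, (pyBest all d).getD (0, ""))) := by
  induction all using List.reverseRecOn with
  | nil => rfl
  | append_singleton xs x ih =>
    have hfold : dictA (xs ++ [x]) = stepA (dictA xs) x := by
      simp [dictA, List.foldl_append]
    set S := PySem.Set.ofList (xs.map (fun t => t.1)) with hSdef
    have hS' : PySem.Set.ofList ((xs ++ [x]).map (fun t => t.1)) = PySem.Set.add S x.1 := by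
      simp [hSdef, PySem.Set.ofList_eq_foldl, List.foldl_append]
    have hkeys : (dictA xs).keys = S := by
      simp only [PySem.Dict.keys, ih, List.map_map]
      have : ((fun p : String × (Int × String) => p.1) ∘
          fun d => (d, (pyBest xs d).getD (0, ""))) = id := rfl
      rw [this, List.map_id]
    have hnodupS : S.Nodup := hSdef ▸ PySem.Set.nodup_ofList _
    have hnodupkeys : (dictA xs).keys.Nodup := hkeys ▸ hnodupS
    have hcont : (dictA xs).contains x.1 = true ↔ x.1 ∈ xs.map (fun t => t.1) := by
      rw [PySem.Dict.contains_iff_mem_keys, hkeys, hSdef, PySem.Set.mem_ofList]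
    have hmemS : ∀ d ∈ S, d ∈ xs.map (fun t => t.1) := by
      intro d hd; rwa [hSdef, PySem.Set.mem_ofList] at hd
    rw [hfold, hS']
    by_cases hc : x.1 ∈ xs.map (fun t => t.1)
    · -- date already present
      have hct : (dictA xs).contains x.1 = true := hcont.mpr hc
      have hmem1 : x.1 ∈ S := by rw [hSdef, PySem.Set.mem_ofList]; exact hc
      have haddS : PySem.Set.add S x.1 = S := by
        simp only [PySem.Set.add]
        rw [if_pos (by simpa [PySem.Set.contains] using hmem1)]
      obtain ⟨b, hb⟩ : ∃ b, pyBest xs x.1 = some b := by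
        cases h : pyBest xs x.1 with
        | none => exact absurd ((pyBest_none_iff xs x.1).mp h) (by simpa using hc)
        | some b => exact ⟨b, rfl⟩
      have hmemitems : (x.1, (pyBest xs x.1).getD (0, "")) ∈ (dictA xs).items := by
        rw [ih]; exact List.mem_map_of_mem hmem1
      have hgetD : (dictA xs).getD x.1 (0, "") = b := by
        have := PySem.Dict.getD_of_mem_items (dictA xs) hmemitems hnodupkeys (0, "")
        rw [this, hb]; rfl
      rw [haddS]
      unfold stepA
      rw [if_neg (by simp [hct]), hgetD]
      by_cases hlt : x.2.1 < b.1
      · rw [if_pos hlt, PySem.Dict.items_insert_of_contains _ _ hct, ih, List.map_map]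
        apply List.map_congr_left
        intro d hd
        simp only [Function.comp_apply]
        rw [pyBest_snoc]
        by_cases hdx : d = x.1
        · subst hdx
          simp [hb, hlt]
        · have h1 : x.1 ≠ d := fun e => hdx e.symm
          simp [hdx, h1]
      · rw [if_neg hlt, ih]
        apply List.map_congr_left
        intro d hd
        rw [pyBest_snoc]
        by_cases hdx : d = x.1
        · subst hdx; simp [hb, hlt]
        · have h1 : x.1 ≠ d := fun e => hdx e.symm
          simp [h1]
    · -- fresh date: appended at the end
      have hcf : (dictA xs).contains x.1 = false := by
        cases h : (dictA xs).contains x.1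
        · rfl
        · exact absurd (hcont.mp h) hc
      have hnmem1 : x.1 ∉ S := fun hm => hc (hmemS _ hm)
      have haddS : PySem.Set.add S x.1 = S ++ [x.1] := by
        simp only [PySem.Set.add]
        rw [if_neg (by simpa [PySem.Set.contains] using hnmem1)]
      have hnone : pyBest xs x.1 = none := (pyBest_none_iff xs x.1).mpr hc
      rw [haddS]
      unfold stepA
      rw [if_pos (by simp [hcf])]
      rw [PySem.Dict.items_insert_of_not_contains _ _ hcf, ih, List.map_append]
      congr 1
      · apply List.map_congr_left
        intro d hd
        have hdx : x.1 ≠ d := fun e => hc (e ▸ hmemS d hd)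
        rw [pyBest_snoc, if_neg hdx]
      · simp [pyBest_snoc, hnone]

-- B's append loop is a map
theorem foldl_app_map (f : String → String × String) (dates : List String) :
    ∀ acc : List (String × String),
      dates.foldl (fun res d => res ++ [f d]) acc = acc ++ dates.map f := by
  induction dates with
  | nil => intro acc; simp
  | cons d ds ih => intro acc; simp [ih]

-- insertion with two pointwise-equal comparators is the same insertion
theorem insertBy_congr {α : Type} (p q : α → α → Bool) (s : List α)
    (h : ∀ a ∈ s, ∀ b ∈ s, p a b = q a b) (x : α) (hx : x ∈ s) :
    ∀ ys : List α, (∀ a ∈ ys, a ∈ s) →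
      PySem.List.insertBy p x ys = PySem.List.insertBy q x ys := by
  intro ys
  induction ys with
  | nil => intro _; rfl
  | cons y ys ih =>
    intro hys
    have hy : y ∈ s := hys y (List.mem_cons_self ..)
    simp only [PySem.List.insertBy, h x hx y hy]
    split
    · rfl
    · exact congrArg (y :: ·) (ih (fun a ha => hys a (List.mem_cons_of_mem _ ha)))

theorem foldl_insertBy_congr {α : Type} (p q : α → α → Bool) (s : List α)
    (h : ∀ a ∈ s, ∀ b ∈ s, p a b = q a b) :
    ∀ (xs acc : List α), (∀ a ∈ xs, a ∈ s) → (∀ a ∈ acc, a ∈ s) →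
      xs.foldl (fun acc x => PySem.List.insertBy p x acc) acc
        = xs.foldl (fun acc x => PySem.List.insertBy q x acc) acc := by
  intro xs
  induction xs with
  | nil => intro acc _ _; rfl
  | cons x xs ih =>
    intro acc hxs hacc
    have hx : x ∈ s := hxs x (List.mem_cons_self ..)
    simp only [List.foldl_cons]
    rw [insertBy_congr p q s h x hx acc hacc]
    exact ih _ (fun a ha => hxs a (List.mem_cons_of_mem _ ha))
      (fun a ha => ((PySem.List.mem_insertBy q x a acc).mp ha).elim (fun e => e ▸ hx) (hacc a))

-- on a list whose first components are all distinct, Python's tuple sort is the sort by first component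
theorem sorted2_eq_sorted_fst (L : List (String × String)) (h : (L.map (fun p => p.1)).Nodup) :
    PySem.List.sorted2 L (fun p => p.1) (fun p => p.2) = PySem.List.sorted L (fun p => p.1) := by
  have hinj := List.inj_on_of_nodup_map h
  rw [PySem.List.sorted_eq_foldl_insertBy]
  show L.foldl (fun acc x => PySem.List.insertBy _ x acc) [] = _
  apply foldl_insertBy_congr _ _ L _ L [] (fun a ha => ha) (by simp)
  intro a ha b hb
  by_cases hab : a.1 = b.1
  · have : a = b := hinj ha hb hab
    subst this
    simp
  · rcases lt_or_gt_of_ne hab with hlt | hgt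
    · simp [hlt]
    · simp [hgt, not_lt_of_gt (α := String) hgt]

-- ===== VERDICT (by name: the statement is the Claim_ definition above) =====
theorem get_latest_info_per_day_spec : Claim_equal_get_latest_info_per_day := by
  intro all _dom
  unfold Spec_get_latest_info_per_day
  show get_latest_info_per_day all = get_latest_info_per_day_alt all
  have hA : get_latest_info_per_day all
      = PySem.List.sorted2 ((dictA all).items.map (fun kv => (kv.1, kv.2.2)))
          (fun p => p.1) (fun p => p.2) := rfl
  set S := PySem.Set.ofList (all.map (fun t => t.1)) with hSdef
  set g2 : String → String × String := fun d => (d, ((pyBest all d).getD (0, "")).2) with hg2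
  have hL : (dictA all).items.map (fun kv => (kv.1, kv.2.2)) = S.map g2 := by
    rw [itemsA, List.map_map]; rfl
  have hnodupS : S.Nodup := hSdef ▸ PySem.Set.nodup_ofList _
  have hnodup : ((S.map g2).map (fun p => p.1)).Nodup := by
    rw [List.map_map]
    have : ((fun p : String × String => p.1) ∘ g2) = id := rfl
    rw [this, List.map_id]
    exact hnodupS
  have hB : get_latest_info_per_day_alt all
      = (PySem.List.sorted S (fun x => x)).map g2 := by
    show (PySem.List.sorted S (fun x => x)).foldl (fun res d => res ++ [g2 d]) [] = _
    rw [foldl_app_map]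
    simp
  rw [hA, hL, hB, sorted2_eq_sorted_fst _ hnodup]
  apply PySem.List.sorted_eq_of_perm_of_pairwise_lt
  · exact (PySem.List.sorted_perm S (fun x => x) false).map g2
  · rw [List.pairwise_map]
    have h := PySem.List.sorted_ofList_pairwise_lt (all.map (fun t => t.1))
    rw [hSdef]
    exact h
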